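-- pv_equiv track=rewrite | github.com/mariiio/rally-cut | analysis/scripts/eval_reid_loocv.py | find_best_permutation
-- ===== SOURCE A (Python) =====
-- import itertools
--
-- def find_best_permutation(
--     gt_rallies: dict[str, dict[str, int]],
--     pred_rallies: dict[str, dict[str, int]],
-- ) -> tuple[dict[int, int], int, int]:
--     """Find optimal permutation mapping pred→GT player IDs."""
--     player_ids = [1, 2, 3, 4]
--     best_perm: dict[int, int] = {}
--     best_correct = -1
--     best_total = 0
--
--     for perm in itertools.permutations(player_ids):
--         pred_to_gt = dict(zip(player_ids, perm))
--         correct = 0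
--         total = 0
--         for rid in gt_rallies:
--             if rid not in pred_rallies:
--                 continue
--             gt = gt_rallies[rid]
--             pred = pred_rallies[rid]
--             for tid_str in gt:
--                 if tid_str not in pred:
--                     continue
--                 total += 1
--                 if pred_to_gt.get(pred[tid_str]) == gt[tid_str]:
--                     correct += 1
--         if correct > best_correct:
--             best_correct = correct
--             best_total = total
--             best_perm = pred_to_gt
--
--     return best_perm, best_correct, best_total
-- ===== SOURCE B (Python) =====
-- import itertools
--
-- def find_best_permutation(
--     gt_rallies: dict[str, dict[str, int]],
--     pred_rallies: dict[str, dict[str, int]],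
-- ) -> tuple[dict[int, int], int, int]:
--     """One pass builds a confusion counter; 24 permutations are scored from it."""
--     player_ids = [1, 2, 3, 4]
--     conf: dict[tuple[int, int], int] = {}
--     total = 0
--     for rid, gt in gt_rallies.items():
--         if rid not in pred_rallies:
--             continue
--         pred = pred_rallies[rid]
--         for tid_str, g in gt.items():
--             if tid_str not in pred:
--                 continue
--             total += 1
--             key = (pred[tid_str], g)
--             conf[key] = conf.get(key, 0) + 1
--     best_perm: dict[int, int] = {}
--     best_correct = -1
--     for perm in itertools.permutations(player_ids):
--         correct = 0
--         for p, t in zip(player_ids, perm):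
--             correct += conf.get((p, t), 0)
--         if correct > best_correct:
--             best_correct = correct
--             best_perm = dict(zip(player_ids, perm))
--     return best_perm, best_correct, total
-- ===== Notes on version B (the rewrite author's own statement) =====
-- stated objective: faster
-- what changed: B makes a single pass over the rallies to build a 4x4-style confusion counter of (pred_id, gt_id) pairs plus the matched total, then scores each of the 24 permutations from the counter, instead of re-scanning all rallies and tracks for every permutation.
import Mathlib
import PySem

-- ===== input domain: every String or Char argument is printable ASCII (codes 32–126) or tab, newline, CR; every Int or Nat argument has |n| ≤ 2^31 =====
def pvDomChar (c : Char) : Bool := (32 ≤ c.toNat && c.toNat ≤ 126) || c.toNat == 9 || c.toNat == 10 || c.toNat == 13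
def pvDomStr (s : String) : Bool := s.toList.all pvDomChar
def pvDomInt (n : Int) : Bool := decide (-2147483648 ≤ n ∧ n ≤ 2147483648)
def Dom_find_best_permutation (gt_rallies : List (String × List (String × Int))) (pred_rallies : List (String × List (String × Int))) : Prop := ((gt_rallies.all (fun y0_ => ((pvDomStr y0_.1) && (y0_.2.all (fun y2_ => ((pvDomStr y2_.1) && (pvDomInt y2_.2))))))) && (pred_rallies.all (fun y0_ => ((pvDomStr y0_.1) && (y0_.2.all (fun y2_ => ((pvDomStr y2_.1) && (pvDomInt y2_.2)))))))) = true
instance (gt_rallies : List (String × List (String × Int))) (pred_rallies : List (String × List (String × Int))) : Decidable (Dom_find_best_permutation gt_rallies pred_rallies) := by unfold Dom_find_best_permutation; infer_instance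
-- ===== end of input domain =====

-- B replaces A's 24 full scans of the data by one confusion-counter pass plus 24 table
-- lookups; dicts are association lists per the type convention (Python dicts: unique keys).

-- dict lookup d[k] / d.get(k) / 'k in d' (first match)
def pyDictGet? {κ ν : Type} [BEq κ] (d : List (κ × ν)) (k : κ) : Option ν :=
  (PySem.Dict.mk d).get? k

-- ===== PORT A =====
-- body of A's inner 'for tid_str in gt' loop
def pvAstep (m : List (Int × Int)) (pred : List (String × Int)) (ct : Int × Int) (te : String × Int) : Int × Int :=
  match pyDictGet? pred te.1 with
  | none => ct
  | some pv =>
    let ct := (ct.1, ct.2 + 1)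
    if pyDictGet? m pv == some te.2 then (ct.1 + 1, ct.2) else ct

-- body of A's 'for rid in gt_rallies' loop
def pvArally (m : List (Int × Int)) (pred_rallies : List (String × List (String × Int))) (ct : Int × Int) (e : String × List (String × Int)) : Int × Int :=
  match pyDictGet? pred_rallies e.1 with
  | none => ct
  | some pred => e.2.foldl (pvAstep m pred) ct

def find_best_permutation (gt_rallies : List (String × List (String × Int))) (pred_rallies : List (String × List (String × Int))) : (List (Int × Int)) × Int × Int :=
  let player_ids : List Int := [1, 2, 3, 4]
  (PySem.List.permutations player_ids 4).foldl
    (fun (best : (List (Int × Int)) × Int × Int) perm =>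
      let pred_to_gt : List (Int × Int) := player_ids.zip perm
      let ct : Int × Int := gt_rallies.foldl (pvArally pred_to_gt pred_rallies) (0, 0)
      if ct.1 > best.2.1 then (pred_to_gt, ct.1, ct.2) else best)
    ([], -1, 0)

-- ===== PORT B =====
-- body of B's inner 'for tid_str, g in gt.items()' loop: bump conf[(pred[tid], g)], total += 1
def pvBstep (pred : List (String × Int)) (st : PySem.Dict (Int × Int) Int × Int) (te : String × Int) : PySem.Dict (Int × Int) Int × Int :=
  match pyDictGet? pred te.1 with
  | none => st
  | some pv => (st.1.insert (pv, te.2) (st.1.getD (pv, te.2) 0 + 1), st.2 + 1)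

-- body of B's 'for rid, gt in gt_rallies.items()' loop
def pvBrally (pred_rallies : List (String × List (String × Int))) (st : PySem.Dict (Int × Int) Int × Int) (e : String × List (String × Int)) : PySem.Dict (Int × Int) Int × Int :=
  match pyDictGet? pred_rallies e.1 with
  | none => st
  | some pred => e.2.foldl (pvBstep pred) st

def find_best_permutation_alt (gt_rallies : List (String × List (String × Int))) (pred_rallies : List (String × List (String × Int))) : (List (Int × Int)) × Int × Int :=
  let player_ids : List Int := [1, 2, 3, 4]
  -- one pass over the data: confusion counter + matched total
  let st : PySem.Dict (Int × Int) Int × Int :=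
    gt_rallies.foldl (pvBrally pred_rallies) (PySem.Dict.empty, 0)
  -- score the 24 permutations from the counter
  let best : (List (Int × Int)) × Int := (PySem.List.permutations player_ids 4).foldl
    (fun (b : (List (Int × Int)) × Int) perm =>
      let correct : Int := (player_ids.zip perm).foldl (fun c q => c + st.1.getD q 0) 0
      if correct > b.2 then (player_ids.zip perm, correct) else b)
    ([], -1)
  (best.1, best.2, st.2)

-- ===== PRECONDITION & SPEC =====
def Spec_find_best_permutation (gt_rallies : List (String × List (String × Int))) (pred_rallies : List (String × List (String × Int))) (out : (List (Int × Int)) × Int × Int) : Prop := out = find_best_permutation_alt gt_rallies pred_rallies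
instance (gt_rallies : List (String × List (String × Int))) (pred_rallies : List (String × List (String × Int))) (out : (List (Int × Int)) × Int × Int) : Decidable (Spec_find_best_permutation gt_rallies pred_rallies out) := by unfold Spec_find_best_permutation; infer_instance

-- ===== CLAIM (what is proved, stated in full; the proofs are below) =====
def Claim_equal_find_best_permutation : Prop := ∀ (gt_rallies : List (String × List (String × Int))) (pred_rallies : List (String × List (String × Int))), Dom_find_best_permutation gt_rallies pred_rallies → Spec_find_best_permutation gt_rallies pred_rallies (find_best_permutation gt_rallies pred_rallies)

-- ===== LEMMAS AND PROOFS =====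

-- matched (pred_id, gt_id) pairs contributed by one rally
def pairsOf (pred : List (String × Int)) (xs : List (String × Int)) : List (Int × Int) :=
  xs.filterMap (fun te => (pyDictGet? pred te.1).map (fun pv => (pv, te.2)))

-- the multiset of matched (pred_id, gt_id) pairs both programs traverse
def pvPairs (gt_rallies pred_rallies : List (String × List (String × Int))) : List (Int × Int) :=
  gt_rallies.flatMap (fun e =>
    match pyDictGet? pred_rallies e.1 with
    | none => []
    | some pred => pairsOf pred e.2)

theorem pvA_entry (pred : List (String × Int)) (xs : List (String × Int)) (m : List (Int × Int)) (c t : Int) :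
    xs.foldl (pvAstep m pred) (c, t)
    = (c + ((pairsOf pred xs).countP (fun q => pyDictGet? m q.1 == some q.2) : Int),
       t + ((pairsOf pred xs).length : Int)) := by
  induction xs generalizing c t with
  | nil => simp [pairsOf]
  | cons te rest ih =>
    rw [List.foldl_cons]
    cases hg : pyDictGet? pred te.1 with
    | none =>
      have hs : pvAstep m pred (c, t) te = (c, t) := by simp [pvAstep, hg]
      rw [hs, ih]
      simp [pairsOf, hg]
    | some pv =>
      by_cases hm : (pyDictGet? m pv == some te.2) = true
      · have hs : pvAstep m pred (c, t) te = (c + 1, t + 1) := by simp [pvAstep, hg, hm]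
        rw [hs, ih]
        simp [pairsOf, hg, hm]
        constructor <;> ring
      · have hs : pvAstep m pred (c, t) te = (c, t + 1) := by simp [pvAstep, hg, hm]
        rw [hs, ih]
        simp [pairsOf, hg, hm]
        ring

theorem pvA_inner (gt_rallies pred_rallies : List (String × List (String × Int))) (m : List (Int × Int)) (c t : Int) :
    gt_rallies.foldl (pvArally m pred_rallies) (c, t)
    = (c + ((pvPairs gt_rallies pred_rallies).countP (fun q => pyDictGet? m q.1 == some q.2) : Int),
       t + ((pvPairs gt_rallies pred_rallies).length : Int)) := by
  induction gt_rallies generalizing c t with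
  | nil => simp [pvPairs]
  | cons e rest ih =>
    rw [List.foldl_cons]
    cases hg : pyDictGet? pred_rallies e.1 with
    | none =>
      have hs : pvArally m pred_rallies (c, t) e = (c, t) := by simp [pvArally, hg]
      rw [hs, ih]
      simp [pvPairs, hg]
    | some pred =>
      have hs : pvArally m pred_rallies (c, t) e = e.2.foldl (pvAstep m pred) (c, t) := by
        simp [pvArally, hg]
      rw [hs, pvA_entry, ih]
      simp [pvPairs, hg, List.countP_append]
      constructor <;> ring

theorem pvB_entry (pred : List (String × Int)) (xs : List (String × Int)) (d : PySem.Dict (Int × Int) Int) (t : Int) :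
    xs.foldl (pvBstep pred) (d, t)
    = ((pairsOf pred xs).foldl (fun d x => d.insert x (d.getD x 0 + 1)) d,
       t + ((pairsOf pred xs).length : Int)) := by
  induction xs generalizing d t with
  | nil => simp [pairsOf]
  | cons te rest ih =>
    rw [List.foldl_cons]
    cases hg : pyDictGet? pred te.1 with
    | none =>
      have hs : pvBstep pred (d, t) te = (d, t) := by simp [pvBstep, hg]
      rw [hs, ih]; simp [pairsOf, hg]
    | some pv =>
      have hs : pvBstep pred (d, t) te = (d.insert (pv, te.2) (d.getD (pv, te.2) 0 + 1), t + 1) := by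
        simp [pvBstep, hg]
      rw [hs, ih]
      simp [pairsOf, hg]
      ring

theorem pvB_pass (gt_rallies pred_rallies : List (String × List (String × Int))) (d : PySem.Dict (Int × Int) Int) (t : Int) :
    gt_rallies.foldl (pvBrally pred_rallies) (d, t)
    = ((pvPairs gt_rallies pred_rallies).foldl (fun d x => d.insert x (d.getD x 0 + 1)) d,
       t + ((pvPairs gt_rallies pred_rallies).length : Int)) := by
  induction gt_rallies generalizing d t with
  | nil => simp [pvPairs]
  | cons e rest ih =>
    rw [List.foldl_cons]
    cases hg : pyDictGet? pred_rallies e.1 with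
    | none =>
      have hs : pvBrally pred_rallies (d, t) e = (d, t) := by simp [pvBrally, hg]
      rw [hs, ih]; simp [pvPairs, hg]
    | some pred =>
      have hs : pvBrally pred_rallies (d, t) e = e.2.foldl (pvBstep pred) (d, t) := by
        simp [pvBrally, hg]
      rw [hs, pvB_entry, ih]
      simp [pvPairs, hg, List.foldl_append]
      ring

theorem pyDictGet?_eq_none {κ ν : Type} [BEq κ] [LawfulBEq κ] (d : List (κ × ν)) (k : κ)
    (h : k ∉ d.map Prod.fst) : pyDictGet? d k = none := by
  induction d with
  | nil => simp [pyDictGet?, PySem.Dict.get?]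
  | cons p rest ih =>
    obtain ⟨p1, p2⟩ := p
    simp only [List.map_cons, List.mem_cons, not_or] at h
    rw [pyDictGet?, PySem.Dict.get?_mk_cons]
    have : (p1 == k) = false := by simp; exact fun hh => h.1 hh.symm
    simp only [this]
    exact ih h.2

-- lookup in an assoc list with distinct keys, as a 0/1 indicator sum
theorem pvIndicator (m : List (Int × Int)) (q : Int × Int) (h : (m.map Prod.fst).Nodup) :
    (m.map (fun x => if x = q then (1 : Int) else 0)).sum
      = (if pyDictGet? m q.1 == some q.2 then (1 : Int) else 0) := by
  induction m with
  | nil => simp [pyDictGet?, PySem.Dict.get?]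
  | cons p rest ih =>
    obtain ⟨p1, p2⟩ := p
    simp only [List.map_cons, List.nodup_cons, List.mem_map] at h
    obtain ⟨hp, hrest⟩ := h
    rw [List.map_cons, List.sum_cons, ih hrest]
    simp only [pyDictGet?, PySem.Dict.get?_mk_cons]
    by_cases he : p1 = q.1
    · have hnone : PySem.Dict.get? (PySem.Dict.mk rest) q.1 = none := by
        have h2 : pyDictGet? rest q.1 = none := by
          apply pyDictGet?_eq_none
          rw [← he]
          intro hmem
          rcases List.mem_map.mp hmem with ⟨a, ha, hfst⟩
          exact hp ⟨a, ha, hfst⟩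
        simpa [pyDictGet?] using h2
      simp only [he, BEq.rfl, if_true]
      by_cases hv : p2 = q.2
      · simp [hv, hnone]
      · simp [Prod.ext_iff, hv, hnone]
    · have : (p1 == q.1) = false := by simp [he]
      simp only [this, Bool.false_eq_true, if_false]
      have hne : (p1, p2) ≠ q := by
        intro hh; exact he (by rw [← hh])
      simp [hne]

-- A's matched-count equals B's sum of counter entries along an assoc list m with distinct keys
theorem pvCount_eq (m L : List (Int × Int)) (h : (m.map Prod.fst).Nodup) :
    ((L.countP (fun q => pyDictGet? m q.1 == some q.2)) : Int)
      = (m.map (fun q => (L.count q : Int))).sum := by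
  induction L with
  | nil =>
    symm
    simp only [List.count_nil, Nat.cast_zero, List.countP_nil]
    apply List.sum_eq_zero
    intro x hx
    rcases List.mem_map.mp hx with ⟨q, hq, h0⟩
    exact h0.symm
  | cons x L' ih =>
    rw [List.countP_cons]
    have hcnt : ∀ q : Int × Int, ((x :: L').count q : Int) = (L'.count q : Int) + (if q = x then 1 else 0) := by
      intro q
      rw [List.count_cons]
      by_cases hqx : q = x
      · simp [hqx]
      · simp [hqx]
        exact fun hh => hqx hh.symm
    have : (m.map (fun q => ((x :: L').count q : Int))).sum
        = (m.map (fun q => (L'.count q : Int) + (if q = x then 1 else 0))).sum := by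
      congr 1
      exact List.map_congr_left (fun q _ => hcnt q)
    rw [this, PySem.List.sum_map_add_int, ← ih, pvIndicator m x h]
    by_cases hx : (pyDictGet? m x.1 == some x.2) = true <;> simp [hx]

-- the selection fold with a constant third component carried along
theorem pvSelect_inv (l : List (List Int)) (f : List Int → Int) (zipf : List Int → List (Int × Int)) (T : Int) (m0 : List (Int × Int)) (c0 : Int) :
    l.foldl (fun (best : (List (Int × Int)) × Int × Int) perm =>
        if f perm > best.2.1 then (zipf perm, f perm, T) else best) (m0, c0, T)
    = ((l.foldl (fun (b : (List (Int × Int)) × Int) perm =>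
        if f perm > b.2 then (zipf perm, f perm) else b) (m0, c0)).1,
       (l.foldl (fun (b : (List (Int × Int)) × Int) perm =>
        if f perm > b.2 then (zipf perm, f perm) else b) (m0, c0)).2, T) := by
  induction l generalizing m0 c0 with
  | nil => simp
  | cons p rest ih =>
    simp only [List.foldl_cons]
    by_cases hp : f p > c0
    · rw [if_pos hp, if_pos hp]; exact ih _ _
    · rw [if_neg hp, if_neg hp]; exact ih _ _

-- ===== VERDICT (by name: the statement is the Claim_ definition above) =====
theorem find_best_permutation_spec : Claim_equal_find_best_permutation := by
  intro gt_rallies pred_rallies _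
  unfold Spec_find_best_permutation find_best_permutation find_best_permutation_alt
  simp only []
  set P := pvPairs gt_rallies pred_rallies with hP
  set T : Int := (P.length : Int) with hT
  set score : List Int → Int := fun perm =>
    (P.countP (fun q => pyDictGet? (([1, 2, 3, 4] : List Int).zip perm) q.1 == some q.2) : Int) with hscore
  -- B's one pass
  have hpass : gt_rallies.foldl (pvBrally pred_rallies) (PySem.Dict.empty, 0)
      = (P.foldl (fun d x => d.insert x (d.getD x 0 + 1)) PySem.Dict.empty, T) := by
    rw [pvB_pass, ← hP]; simp [hT]
  -- every permutation in the list has length 4 and distinct zipped keys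
  have hnodup : ∀ perm ∈ PySem.List.permutations ([1, 2, 3, 4] : List Int) 4,
      ((([1, 2, 3, 4] : List Int).zip perm).map Prod.fst).Nodup := by
    intro perm hmem
    have hp : perm.Perm ([1, 2, 3, 4] : List Int) := PySem.List.perm_of_mem_permutations hmem
    have hlen : perm.length = 4 := hp.length_eq
    have : (([1, 2, 3, 4] : List Int).zip perm).map Prod.fst = [1, 2, 3, 4] := by
      apply List.map_fst_zip
      simp [hlen]
    rw [this]; decide
  -- A's fold body in canonical selection form
  have hAfold : (PySem.List.permutations ([1, 2, 3, 4] : List Int) 4).foldl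
      (fun (best : (List (Int × Int)) × Int × Int) perm =>
        let pred_to_gt : List (Int × Int) := ([1, 2, 3, 4] : List Int).zip perm
        let ct : Int × Int := gt_rallies.foldl (pvArally pred_to_gt pred_rallies) (0, 0)
        if ct.1 > best.2.1 then (pred_to_gt, ct.1, ct.2) else best) ([], -1, 0)
    = (PySem.List.permutations ([1, 2, 3, 4] : List Int) 4).foldl
      (fun (best : (List (Int × Int)) × Int × Int) perm =>
        if score perm > best.2.1 then (([1, 2, 3, 4] : List Int).zip perm, score perm, T) else best) ([], -1, 0) := by
    apply PySem.List.foldl_congr_mem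
    intro acc perm _
    simp only [pvA_inner, zero_add, ← hP, hscore, hT]
  -- B's scoring fold body in canonical selection form
  have hBfold : ∀ init : (List (Int × Int)) × Int,
      (PySem.List.permutations ([1, 2, 3, 4] : List Int) 4).foldl
      (fun (b : (List (Int × Int)) × Int) perm =>
        let correct : Int := (([1, 2, 3, 4] : List Int).zip perm).foldl
          (fun c q => c + (P.foldl (fun d x => d.insert x (d.getD x 0 + 1)) PySem.Dict.empty).getD q 0) 0
        if correct > b.2 then (([1, 2, 3, 4] : List Int).zip perm, correct) else b) init
    = (PySem.List.permutations ([1, 2, 3, 4] : List Int) 4).foldl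
      (fun (b : (List (Int × Int)) × Int) perm =>
        if score perm > b.2 then (([1, 2, 3, 4] : List Int).zip perm, score perm) else b) init := by
    intro init
    apply PySem.List.foldl_congr_mem
    intro acc perm hmem
    have hc : (([1, 2, 3, 4] : List Int).zip perm).foldl
        (fun c q => c + (P.foldl (fun d x => d.insert x (d.getD x 0 + 1)) PySem.Dict.empty).getD q 0) 0
        = score perm := by
      rw [PySem.List.foldl_add]
      have hgetD : ∀ q : Int × Int,
          (P.foldl (fun d x => d.insert x (d.getD x 0 + 1)) PySem.Dict.empty).getD q 0 = (P.count q : Int) := by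
        intro q
        rw [PySem.Dict.getD_foldl_insert_add_one, PySem.Dict.getD_empty]
        exact zero_add _
      rw [List.map_congr_left (fun q _ => hgetD q)]
      have hcp := pvCount_eq (([1, 2, 3, 4] : List Int).zip perm) P (hnodup perm hmem)
      simp only [hscore]
      rw [← hcp, zero_add]
    rw [hc]
  rw [hpass, hAfold]
  simp only []
  rw [hBfold]
  -- peel the first permutation: its score is ≥ 0 > -1, so both sides select it
  have hfirst : PySem.List.permutations ([1, 2, 3, 4] : List Int) 4
      = ([1, 2, 3, 4] : List Int) :: (PySem.List.permutations ([1, 2, 3, 4] : List Int) 4).tail := rfl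
  rw [hfirst, List.foldl_cons, List.foldl_cons]
  have h0 : score ([1, 2, 3, 4] : List Int) > -1 := by
    have : (0 : Int) ≤ score ([1, 2, 3, 4] : List Int) := by
      simp only [hscore]
      exact_mod_cast Int.natCast_nonneg _
    omega
  simp only [h0, if_pos]
  rw [pvSelect_inv]
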